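-- pv_equiv track=rewrite | github.com/zarrar-ali-brainx/med-dose-ai-chatbot | extract_medicines.py | parse_medicine_data
-- ===== SOURCE A (Python) =====
-- def parse_medicine_data(text):
--     # Assuming each medicine starts with a name followed by its description
--     medicines = {}
--     lines = text.split('\n')
--     current_medicine = None
--
--     for line in lines:
--         line = line.strip()
--         if not line:
--             continue
--         if line.isupper():  # Assuming medicine names are in uppercase
--             current_medicine = line
--             medicines[current_medicine] = ""
--         elif current_medicine:
--             medicines[current_medicine] += line + " "
--
--     return medicines
-- ===== SOURCE B (Python) =====
-- def parse_medicine_data(text):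
--     # Reverse scan: walk the non-empty stripped lines from the bottom up, collecting
--     # description lines until the name above them appears, emitting (name, description)
--     # blocks back-to-front; then build the dict from the blocks in text order.
--     stripped = [s for s in (ln.strip() for ln in text.split('\n')) if s]
--     body = []    # description lines below the current position, in reverse order
--     blocks = []  # (name, description) pairs, found back-to-front
--     for s in reversed(stripped):
--         if s.isupper():
--             blocks.append((s, ''.join(x + ' ' for x in reversed(body))))
--             body = []
--         else:
--             body.append(s)
--     medicines = {}
--     for name, desc in reversed(blocks):
--         medicines[name] = desc
--     return medicines
-- ===== Notes on version B (the rewrite author's own statement) =====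
-- stated objective: alternative
-- what changed: A's single forward pass holding the name seen most recently and appending to its dict entry is replaced by a reverse scan that collects each description block and emits (name, description) pairs back-to-front, the dict then being built from the reversed pair list.
import Mathlib
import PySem

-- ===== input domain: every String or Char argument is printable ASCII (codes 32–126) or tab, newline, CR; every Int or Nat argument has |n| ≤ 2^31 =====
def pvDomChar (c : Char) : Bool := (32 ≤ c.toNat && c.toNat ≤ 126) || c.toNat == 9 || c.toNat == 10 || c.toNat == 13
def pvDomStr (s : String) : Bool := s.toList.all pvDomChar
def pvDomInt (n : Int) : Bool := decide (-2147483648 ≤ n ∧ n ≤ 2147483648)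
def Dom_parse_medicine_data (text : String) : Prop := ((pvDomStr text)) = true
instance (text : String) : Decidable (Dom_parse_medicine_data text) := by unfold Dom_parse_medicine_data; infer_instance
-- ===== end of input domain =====

-- B replaces A's single stateful forward pass by a reverse scan that emits (name, description)
-- blocks back-to-front and then builds the dict from the reversed block list (objective: alternative).

-- hand port of Python str.isupper, exact on the ASCII domain: the only cased ASCII
-- characters are the letters, so isupper = some uppercase letter and no lowercase letter
def pyStrIsupper (s : String) : Bool :=
  s.toList.any PySem.Chars.isupper && !(s.toList.any PySem.Chars.islower)

-- ===== PORT A =====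
-- loop body of A: non-empty branches (name line / description line appended to the current entry)
-- Python reads medicines[current_medicine] before writing it; the key is always present there
-- (it was inserted when current_medicine was set), so getD's default "" is never used.
def stepA' (st : PySem.Dict String String × Option String) (line : String) :
    PySem.Dict String String × Option String :=
  if pyStrIsupper line then (st.1.insert line "", some line)
  else
    match st.2 with
    | some c =>
      -- 'elif current_medicine:' — Python truthiness: None and "" are falsy
      if c = "" then st else (st.1.insert c (st.1.getD c "" ++ line ++ " "), st.2)
    | none => st

-- full loop body of A: strip the line, skip it if empty
def stepA (st : PySem.Dict String String × Option String) (rawLine : String) :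
    PySem.Dict String String × Option String :=
  let line := PySem.Str.strip rawLine
  if line = "" then st else stepA' st line

def parse_medicine_data (text : String) : List (String × String) :=
  let lines := (PySem.Str.split? text "\n").getD []
  let st := lines.foldl stepA (PySem.Dict.empty, none)
  st.1.items

-- ===== PORT B =====
-- exact hand port of ''.join(x + ' ' for x in body): the separator is empty
def joinSp : List String → String
  | [] => ""
  | s :: rest => s ++ " " ++ joinSp rest

-- reverse-scan step: a name line closes the block collected so far, any other line joins the body
def stepB (st : List String × List (String × String)) (s : String) :
    List String × List (String × String) :=
  if pyStrIsupper s then ([], st.2 ++ [(s, joinSp st.1.reverse)])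
  else (st.1 ++ [s], st.2)

def parse_medicine_data_alt (text : String) : List (String × String) :=
  let stripped := ((((PySem.Str.split? text "\n").getD []).map PySem.Str.strip).filter (· ≠ ""))
  let st := stripped.reverse.foldl stepB ([], [])
  (st.2.reverse.foldl (fun d (p : String × String) => d.insert p.1 p.2)
    (PySem.Dict.empty : PySem.Dict String String)).items

-- ===== PRECONDITION & SPEC =====
def Spec_parse_medicine_data (text : String) (out : List (String × String)) : Prop := out = parse_medicine_data_alt text
instance (text : String) (out : List (String × String)) : Decidable (Spec_parse_medicine_data text out) := by unfold Spec_parse_medicine_data; infer_instance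

-- ===== CLAIM (what is proved, stated in full; the proofs are below) =====
def Claim_equal_parse_medicine_data : Prop := ∀ (text : String), Dom_parse_medicine_data text → Spec_parse_medicine_data text (parse_medicine_data text)

-- ===== LEMMAS AND PROOFS =====

-- the common description of both programs: the (name, block) pairs of a clean line list
def chunks : List String → List (String × String)
  | [] => []
  | x :: xs =>
    if pyStrIsupper x then
      (x, joinSp (xs.takeWhile (fun s => !pyStrIsupper s))) ::
        chunks (xs.dropWhile (fun s => !pyStrIsupper s))
    else chunks xs
termination_by ls => ls.length
decreasing_by
  · exact Nat.lt_succ_of_le (List.length_dropWhile_le _ _)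
  · simp

theorem chunks_dropWhile (ls : List String) :
    chunks (ls.dropWhile (fun s => !pyStrIsupper s)) = chunks ls := by
  induction ls with
  | nil => rfl
  | cons x xs ih =>
    by_cases h : pyStrIsupper x = true
    · simp [List.dropWhile, h]
    · simp only [Bool.not_eq_true] at h
      simp [List.dropWhile, h, chunks, ← ih]

theorem pyStrIsupper_ne_empty {s : String} (h : pyStrIsupper s = true) : s ≠ "" := by
  intro he; subst he; simp [pyStrIsupper] at h

-- A's fold over raw lines equals the stripped-and-filtered fold by stepA'
theorem foldA_filter (lines : List String) (st : PySem.Dict String String × Option String) :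
    lines.foldl stepA st
      = ((lines.map PySem.Str.strip).filter (· ≠ "")).foldl stepA' st := by
  induction lines generalizing st with
  | nil => rfl
  | cons l ls ih =>
    by_cases h : PySem.Str.strip l = ""
    · simp [stepA, h, ih]
    · simp [stepA, h, ih]

-- the A-side characterisation: the stateful pass computes the chunk folds
theorem foldA_chunks (ls : List String) :
    (∀ d : PySem.Dict String String,
      (ls.foldl stepA' (d, none)).1 = (chunks ls).foldl (fun d p => d.insert p.1 p.2) d)
    ∧ (∀ (d : PySem.Dict String String) (c v : String), c ≠ "" →
      (ls.foldl stepA' (d.insert c v, some c)).1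
        = (chunks (ls.dropWhile (fun s => !pyStrIsupper s))).foldl (fun d p => d.insert p.1 p.2)
            (d.insert c (v ++ joinSp (ls.takeWhile (fun s => !pyStrIsupper s))))) := by
  induction ls with
  | nil =>
    constructor
    · intro d; simp [chunks]
    · intro d c v _; simp [chunks, joinSp, List.takeWhile, List.dropWhile]
  | cons x xs ih =>
    obtain ⟨ih1, ih2⟩ := ih
    by_cases h : pyStrIsupper x = true
    · have hx := pyStrIsupper_ne_empty h
      constructor
      · intro d
        have step : stepA' (d, none) x = (d.insert x "", some x) := by simp [stepA', h]
        rw [List.foldl_cons, step, ih2 d x "" hx]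
        simp [chunks, h, String.empty_append]
      · intro d c v _
        have step : stepA' (d.insert c v, some c) x = ((d.insert c v).insert x "", some x) := by
          simp [stepA', h]
        rw [List.foldl_cons, step, ih2 (d.insert c v) x "" hx]
        simp [chunks, h, List.takeWhile, List.dropWhile, joinSp, String.empty_append,
          String.append_empty]
    · simp only [Bool.not_eq_true] at h
      constructor
      · intro d
        simp only [List.foldl_cons, stepA', h]
        simp only [Bool.false_eq_true, if_false]
        rw [show chunks (x :: xs) = chunks xs from by simp [chunks, h]]
        exact ih1 d
      · intro d c v hc
        simp only [List.foldl_cons, stepA', h, Bool.false_eq_true, if_false, if_neg hc]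
        rw [PySem.Dict.getD_insert_self, PySem.Dict.insert_insert_self]
        rw [ih2 d c (v ++ x ++ " ") hc]
        simp [List.takeWhile, List.dropWhile, h, joinSp, String.append_assoc]

-- the B-side characterisation: the reverse scan computes the reversed chunks
theorem foldB_scan (ls : List String) :
    ls.reverse.foldl stepB ([], [])
      = ((ls.takeWhile (fun s => !pyStrIsupper s)).reverse, (chunks ls).reverse) := by
  induction ls with
  | nil => simp [chunks]
  | cons x xs ih =>
    rw [List.reverse_cons, List.foldl_append, ih]
    by_cases h : pyStrIsupper x = true
    · simp [stepB, h, chunks, chunks_dropWhile, List.takeWhile]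
    · simp only [Bool.not_eq_true] at h
      simp [stepB, h, List.takeWhile, show chunks (x :: xs) = chunks xs from by simp [chunks, h]]

-- ===== VERDICT (by name: the statement is the Claim_ definition above) =====
theorem parse_medicine_data_spec : Claim_equal_parse_medicine_data := by
  intro text _
  unfold Spec_parse_medicine_data parse_medicine_data parse_medicine_data_alt
  dsimp only
  rw [foldA_filter, foldB_scan]
  rw [(foldA_chunks _).1 PySem.Dict.empty]
  simp
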